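-- pv_equiv track=rewrite | github.com/981377660LMT/algorithm-study | 20_杂题/atc競プロ/アルゴリズムと数学演習問題集/096 - Cooking-01背包.py | cooking
-- ===== SOURCE A (Python) =====
-- from typing import List
--
-- def cooking(times: List[int]) -> int:
--     dp = set([0])
--     for num in times:
--         ndp = dp.copy()
--         for pre in dp:
--             ndp.add(pre + num)
--         dp = ndp
--     half = (sum(times) + 1) // 2
--     while half not in dp:
--         half += 1
--     return half
-- ===== SOURCE B (Python) =====
-- from typing import List
--
-- def cooking(times: List[int]) -> int:
--     # DP over a strictly increasing list of the achievable subset sums,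
--     # then binary search for the first one >= ceil(total / 2).
--     sums = [0]
--     for t in times:
--         sums = sorted({*sums, *(s + t for s in sums)})
--     half = (sum(times) + 1) // 2
--     lo, hi = 0, len(sums)
--     while lo < hi:
--         mid = (lo + hi) // 2
--         if sums[mid] < half:
--             lo = mid + 1
--         else:
--             hi = mid
--     return sums[lo]
-- ===== Notes on version B (the rewrite author's own statement) =====
-- stated objective: alternative
-- what changed: Keeps the achievable subset sums as a strictly increasing deduplicated list (sorted-set merge per element) instead of A's hash set, and finds the first sum >= ceil(total/2) by binary search instead of A's one-integer-at-a-time upward membership scan.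
import Mathlib
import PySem

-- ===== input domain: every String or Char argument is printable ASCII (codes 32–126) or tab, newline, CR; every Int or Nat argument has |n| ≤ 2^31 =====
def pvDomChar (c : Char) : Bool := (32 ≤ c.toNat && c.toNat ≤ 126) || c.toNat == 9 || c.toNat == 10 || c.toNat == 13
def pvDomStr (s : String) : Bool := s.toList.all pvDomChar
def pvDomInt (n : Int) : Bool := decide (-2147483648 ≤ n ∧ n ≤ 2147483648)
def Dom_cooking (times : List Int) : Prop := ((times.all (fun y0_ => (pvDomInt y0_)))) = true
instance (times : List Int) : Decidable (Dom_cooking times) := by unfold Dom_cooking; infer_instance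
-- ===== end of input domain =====

-- B keeps the achievable subset sums as a strictly increasing list (sorted-set merge per
-- element) and binary-searches the first sum >= ceil(total/2) instead of A's hash set with
-- a one-by-one upward scan; objective: alternative.


-- ===== PORT A =====
-- 'ndp = dp.copy(); for pre in dp: ndp.add(pre + num); dp = ndp'
def cookingStep (dp : PySem.Set Int) (num : Int) : PySem.Set Int :=
  dp.foldl (fun ndp pre => PySem.Set.add ndp (pre + num)) dp

-- 'while half not in dp: half += 1' — fuel only makes the loop total; it is proved
-- sufficient below (the scan reaches the sum of the nonnegative elements, which is in dp).
def cookingFind (dp : PySem.Set Int) (half : Int) : Nat → Int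
  | 0 => half
  | fuel + 1 => if PySem.Set.contains dp half then half else cookingFind dp (half + 1) fuel

def cooking (times : List Int) : Int :=
  let dp := times.foldl cookingStep (PySem.Set.ofList [0])
  let half := PySem.Int.floordiv (times.sum + 1) 2
  cookingFind dp half (((times.filter (fun t => 0 ≤ t)).sum - half + 1).toNat)

-- ===== PORT B =====
-- 'sums = sorted({*sums, *(s + t for s in sums)})'
def sortStep (sums : List Int) (t : Int) : List Int :=
  PySem.List.sorted (PySem.Set.ofList (sums ++ sums.map (fun s => s + t))) (fun x => x) false

-- 'while lo < hi: mid = (lo + hi) // 2; if sums[mid] < half: lo = mid + 1 else: hi = mid'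
-- lo, hi, mid are Python ints that stay in [0, len(sums)] (established below), so Nat '/'
-- is Python's '//' and 'sums[mid]' is in range there (pyGetD's default is never read).
def bsearch (sums : List Int) (half : Int) (lo hi : Nat) : Nat :=
  if h : lo < hi then
    if PySem.List.pyGetD sums (((lo + hi) / 2 : Nat) : Int) 0 < half then
      bsearch sums half ((lo + hi) / 2 + 1) hi
    else
      bsearch sums half lo ((lo + hi) / 2)
  else lo
termination_by hi - lo
decreasing_by all_goals omega

def cooking_alt (times : List Int) : Int :=
  let sums : List Int := times.foldl sortStep [0]
  let half : Int := PySem.Int.floordiv (times.sum + 1) 2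
  let lo : Nat := bsearch sums half 0 sums.length
  PySem.List.pyGetD sums (lo : Int) 0

-- ===== PRECONDITION & SPEC =====
def Spec_cooking (times : List Int) (out : Int) : Prop := out = cooking_alt times
instance (times : List Int) (out : Int) : Decidable (Spec_cooking times out) := by unfold Spec_cooking; infer_instance

-- ===== CLAIM (what is proved, stated in full; the proofs are below) =====
def Claim_equal_cooking : Prop := ∀ (times : List Int), Dom_cooking times → Spec_cooking times (cooking times)

-- ===== LEMMAS AND PROOFS =====

def negF (l : List Int) : Int := (l.filter (fun t => t < 0)).sum
def posF (l : List Int) : Int := (l.filter (fun t => 0 ≤ t)).sum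

theorem negF_cons (t : Int) (l : List Int) :
    negF (t :: l) = (if t < 0 then t else 0) + negF l := by
  simp only [negF, List.filter_cons]
  split_ifs with h <;> simp_all

theorem posF_cons (t : Int) (l : List Int) :
    posF (t :: l) = (if 0 ≤ t then t else 0) + posF l := by
  simp only [posF, List.filter_cons]
  split_ifs with h <;> simp_all

theorem negF_nonpos (l : List Int) : negF l ≤ 0 := by
  induction l with
  | nil => simp [negF]
  | cons t l ih => rw [negF_cons]; split_ifs with h <;> omega

theorem posF_nonneg (l : List Int) : 0 ≤ posF l := by
  induction l with
  | nil => simp [posF]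
  | cons t l ih => rw [posF_cons]; split_ifs with h <;> omega

theorem sum_eq_negF_add_posF (l : List Int) : l.sum = negF l + posF l := by
  induction l with
  | nil => simp [negF, posF]
  | cons t l ih => rw [List.sum_cons, negF_cons, posF_cons]; split_ifs with h h2 <;> omega

theorem mem_cookingStep (dp : PySem.Set Int) (num x : Int) :
    x ∈ cookingStep dp num ↔ x ∈ dp ∨ ∃ p ∈ dp, x = p + num := by
  unfold cookingStep
  exact PySem.Set.mem_foldl_add dp (fun p => p + num) dp x

theorem pos_mem_fold (l : List Int) : ∀ (dp : PySem.Set Int) (s : Int), s ∈ dp →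
    s + posF l ∈ l.foldl cookingStep dp := by
  induction l with
  | nil => intro dp s h; simpa [posF] using h
  | cons t l ih =>
    intro dp s h
    rw [List.foldl_cons, posF_cons]
    by_cases ht : 0 ≤ t
    · have : (s + t) + posF l ∈ l.foldl cookingStep (cookingStep dp t) :=
        ih _ _ ((mem_cookingStep dp t (s + t)).2 (Or.inr ⟨s, h, rfl⟩))
      simpa [ht, add_comm, add_left_comm, add_assoc] using this
    · have : s + posF l ∈ l.foldl cookingStep (cookingStep dp t) :=
        ih _ _ ((mem_cookingStep dp t s).2 (Or.inl h))
      simpa [ht] using this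

theorem cookingFind_succ (dp : PySem.Set Int) (half : Int) (f : Nat) :
    cookingFind dp half (f + 1) =
      if PySem.Set.contains dp half then half else cookingFind dp (half + 1) f := rfl

theorem cookingFind_eq (dp : PySem.Set Int) : ∀ (j : Nat), ∀ (half : Int) (fuel : Nat),
    (∀ i : Nat, i < j → (half + i) ∉ dp) → (half + j) ∈ dp → j < fuel →
    cookingFind dp half fuel = half + j := by
  intro j
  induction j with
  | zero =>
    intro half fuel _ hmem hf
    obtain ⟨f, rfl⟩ : ∃ f, fuel = f + 1 := ⟨fuel - 1, by omega⟩
    have hc : PySem.Set.contains dp half = true :=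
      (PySem.Set.contains_iff dp half).2 (by simpa using hmem)
    rw [cookingFind_succ, hc, if_pos rfl]
    simp
  | succ j ih =>
    intro half fuel hmin hmem hf
    obtain ⟨f, rfl⟩ : ∃ f, fuel = f + 1 := ⟨fuel - 1, by omega⟩
    have h0 : half ∉ dp := by simpa using hmin 0 (by omega)
    have hc : PySem.Set.contains dp half = false := by
      rw [← Bool.not_eq_true]
      exact fun h => h0 ((PySem.Set.contains_iff dp half).1 h)
    rw [cookingFind_succ, hc, if_neg (by simp)]
    have h1 : ∀ i : Nat, i < j → (half + 1 + (i : Int)) ∉ dp := by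
      intro i hi
      rw [show half + 1 + (i : Int) = half + ((i : Int) + 1) by ring]
      have := hmin (i + 1) (by omega)
      push_cast at this
      exact this
    have h2 : (half + 1 + (j : Int)) ∈ dp := by
      rw [show half + 1 + (j : Int) = half + ((j : Int) + 1) by ring]
      have := hmem
      push_cast at this
      exact this
    rw [ih (half + 1) f h1 h2 (by omega)]
    push_cast
    ring

theorem getD_mono (sums : List Int) (hsort : sums.Pairwise (· ≤ ·)) (p q : Nat)
    (hpq : p ≤ q) (hq : q < sums.length) : sums.getD p 0 ≤ sums.getD q 0 := by
  rcases eq_or_lt_of_le hpq with rfl | h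
  · exact le_refl _
  · rw [List.getD_eq_getElem _ _ (by omega), List.getD_eq_getElem _ _ hq]
    exact List.pairwise_iff_getElem.1 hsort p q (by omega) hq h

theorem mem_sortStep (sums : List Int) (t x : Int) :
    x ∈ sortStep sums t ↔ x ∈ sums ∨ ∃ s ∈ sums, x = s + t := by
  unfold sortStep
  rw [PySem.List.mem_sorted, PySem.Set.mem_ofList, List.mem_append, List.mem_map]
  constructor
  · rintro (h | ⟨s, hs, rfl⟩)
    · exact Or.inl h
    · exact Or.inr ⟨s, hs, rfl⟩
  · rintro (h | ⟨s, hs, rfl⟩)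
    · exact Or.inl h
    · exact Or.inr ⟨s, hs, rfl⟩

theorem sums_inv (l : List Int) : ∀ (dp : PySem.Set Int) (sums : List Int),
    (∀ x : Int, x ∈ sums ↔ x ∈ dp) →
    (∀ x : Int, x ∈ l.foldl sortStep sums ↔ x ∈ l.foldl cookingStep dp) := by
  induction l with
  | nil => intro dp sums h; exact h
  | cons t l ih =>
    intro dp sums h
    rw [List.foldl_cons, List.foldl_cons]
    apply ih
    intro x
    rw [mem_sortStep, mem_cookingStep]
    constructor
    · rintro (hx | ⟨s, hs, rfl⟩)
      · exact Or.inl ((h x).1 hx)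
      · exact Or.inr ⟨s, (h s).1 hs, rfl⟩
    · rintro (hx | ⟨s, hs, rfl⟩)
      · exact Or.inl ((h x).2 hx)
      · exact Or.inr ⟨s, (h s).2 hs, rfl⟩

theorem sums_sorted (l : List Int) : ∀ (sums : List Int), sums.Pairwise (· < ·) →
    (l.foldl sortStep sums).Pairwise (· < ·) := by
  induction l with
  | nil => intro sums h; exact h
  | cons t l ih =>
    intro sums _
    rw [List.foldl_cons]
    exact ih (sortStep sums t) (PySem.List.sorted_ofList_pairwise_lt _)

theorem bsearch_spec (sums : List Int) (half : Int) (hsort : sums.Pairwise (· ≤ ·)) :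
    ∀ (n lo hi : Nat), hi - lo ≤ n → lo ≤ hi → hi ≤ sums.length →
    (∀ i : Nat, i < lo → sums.getD i 0 < half) →
    (∀ i : Nat, hi ≤ i → i < sums.length → half ≤ sums.getD i 0) →
    bsearch sums half lo hi ≤ sums.length ∧
    (∀ i : Nat, i < bsearch sums half lo hi → sums.getD i 0 < half) ∧
    (∀ i : Nat, bsearch sums half lo hi ≤ i → i < sums.length → half ≤ sums.getD i 0) := by
  intro n
  induction n with
  | zero =>
    intro lo hi hn hlh hlen h2 h3
    have heq : lo = hi := by omega
    rw [bsearch, dif_neg (by omega)]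
    exact ⟨by omega, h2, fun i hi1 hi2 => h3 i (by omega) hi2⟩
  | succ n ih =>
    intro lo hi hn hlh hlen h2 h3
    rw [bsearch]
    by_cases hlt : lo < hi
    · rw [dif_pos hlt]
      have hmid1 : lo ≤ (lo + hi) / 2 := by omega
      have hmid2 : (lo + hi) / 2 < hi := by omega
      have hmidlen : (lo + hi) / 2 < sums.length := by omega
      rw [PySem.List.pyGetD_natCast]
      by_cases hc : sums.getD ((lo + hi) / 2) 0 < half
      · rw [if_pos hc]
        apply ih ((lo + hi) / 2 + 1) hi (by omega) (by omega) hlen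
        · intro i hi1
          rcases Nat.lt_or_ge i lo with h | h
          · exact h2 i h
          · exact lt_of_le_of_lt (getD_mono sums hsort i ((lo + hi) / 2) (by omega) hmidlen) hc
        · exact h3
      · rw [if_neg hc]
        apply ih lo ((lo + hi) / 2) (by omega) (by omega) (by omega) h2
        intro i hi1 hi2
        exact le_trans (not_lt.1 hc) (getD_mono sums hsort ((lo + hi) / 2) i hi1 hi2)
    · rw [dif_neg hlt]
      have heq : lo = hi := by omega
      exact ⟨by omega, h2, fun i hi1 hi2 => h3 i (by omega) hi2⟩

theorem cooking_eq (times : List Int) : cooking times = cooking_alt times := by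
  have hneg0 : negF times ≤ 0 := negF_nonpos times
  have hpos0 : 0 ≤ posF times := posF_nonneg times
  have hsum : times.sum = negF times + posF times := sum_eq_negF_add_posF times
  set pos : Int := posF times with hpos
  set half : Int := PySem.Int.floordiv (times.sum + 1) 2 with hhalf
  have hhp : half ≤ pos := by
    have : half < pos + 1 := by
      rw [hhalf, PySem.Int.floordiv_lt_iff_lt_mul (by norm_num)]
      omega
    omega
  set dpF : PySem.Set Int := times.foldl cookingStep (PySem.Set.ofList [0]) with hdpF
  set sums : List Int := times.foldl sortStep [0] with hsums
  have hmemiff : ∀ x : Int, x ∈ sums ↔ x ∈ dpF := by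
    rw [hsums, hdpF]
    exact sums_inv times (PySem.Set.ofList [0]) [0]
      (fun x => by simp [PySem.Set.mem_ofList])
  have hsort : sums.Pairwise (· < ·) := by
    rw [hsums]
    exact sums_sorted times [0] (by simp)
  have hsortle : sums.Pairwise (· ≤ ·) := hsort.imp le_of_lt
  have hposdp : pos ∈ dpF := by
    have := pos_mem_fold times (PySem.Set.ofList [0]) 0 (by simp [PySem.Set.mem_ofList])
    rw [← hdpF] at this
    simpa using this
  have hpossums : pos ∈ sums := (hmemiff pos).2 hposdp
  set r : Nat := bsearch sums half 0 sums.length with hr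
  obtain ⟨hrlen, hbelow, habove⟩ :=
    bsearch_spec sums half hsortle sums.length 0 sums.length (by omega) (by omega)
      (le_refl _) (fun i hi => by omega) (fun i hi1 hi2 => by omega)
  rw [← hr] at hrlen hbelow habove
  obtain ⟨ip, hiplen, hipval⟩ := List.mem_iff_getElem.1 hpossums
  have hipD : sums.getD ip 0 = pos := by rw [List.getD_eq_getElem _ _ hiplen, hipval]
  have hrlt : r < sums.length := by
    by_contra hcon
    have := hbelow ip (by omega)
    omega
  set val : Int := sums.getD r 0 with hval
  have hvalge : half ≤ val := habove r (le_refl _) hrlt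
  have hvaldp : val ∈ dpF := by
    apply (hmemiff val).1
    rw [hval, List.getD_eq_getElem _ _ hrlt]
    exact List.getElem_mem hrlt
  have hiprge : r ≤ ip := by
    by_contra hcon
    have := hbelow ip (by omega)
    omega
  have hvalpos : val ≤ pos := by
    rw [hval, ← hipD]
    exact getD_mono sums hsortle r ip hiprge hiplen
  set jm : Nat := (val - half).toNat with hjmdef
  have hjm : (jm : Int) = val - half := Int.toNat_of_nonneg (by omega)
  have hAmem : (half + (jm : Int)) ∈ dpF := by
    rw [show half + (jm : Int) = val by omega]
    exact hvaldp
  have hAmin : ∀ i : Nat, i < jm → (half + (i : Int)) ∉ dpF := by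
    intro i hilt hmem
    have hinsums : (half + (i : Int)) ∈ sums := (hmemiff _).2 hmem
    obtain ⟨q, hqlen, hqval⟩ := List.mem_iff_getElem.1 hinsums
    have hqD : sums.getD q 0 = half + (i : Int) := by
      rw [List.getD_eq_getElem _ _ hqlen, hqval]
    rcases Nat.lt_or_ge q r with hqr | hqr
    · have := hbelow q hqr
      omega
    · have := getD_mono sums hsortle r q hqr hqlen
      omega
  have hfuel : jm < (pos - half + 1).toNat := by omega
  have hA : cooking times = half + (jm : Int) := by
    unfold cooking
    exact cookingFind_eq dpF jm half ((pos - half + 1).toNat) hAmin hAmem hfuel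
  have hB : cooking_alt times = val := by
    show PySem.List.pyGetD sums ((bsearch sums half 0 sums.length : Nat) : Int) 0 = val
    rw [← hr, PySem.List.pyGetD_natCast, hval]
  rw [hA, hB]
  omega

-- ===== VERDICT (by name: the statement is the Claim_ definition above) =====
theorem cooking_spec : Claim_equal_cooking := by
  intro times _
  unfold Spec_cooking
  exact cooking_eq times
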